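-- pv_equiv track=rewrite | github.com/Jared-Watson1/tichu | backend/game/combinations.py | _fit_phoenix_in_straight
-- ===== SOURCE A (Python) =====
-- def _fit_phoenix_in_straight(ranks: list[int]) -> tuple[int, int] | None:
--     """Find best placement for Phoenix in a straight. Returns (high_rank, length) or None."""
--     if not ranks:
--         return None
--
--     sorted_ranks = sorted(ranks)
--     n = len(sorted_ranks)
--
--     if len(set(sorted_ranks)) != n:
--         return None
--
--     gaps = []
--     for i in range(1, n):
--         diff = sorted_ranks[i] - sorted_ranks[i - 1]
--         if diff == 1:
--             continue
--         elif diff == 2: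
--             gaps.append(i)
--         else:
--             return None
--
--     if len(gaps) == 0:
--         # no gap: phoenix extends at top for highest rank
--         high = sorted_ranks[-1] + 1
--         if high > 14:
--             high = sorted_ranks[-1]
--             return (high, n + 1)  # extend at bottom instead
--         return (high, n + 1)
--     elif len(gaps) == 1:
--         # phoenix fills the gap
--         return (sorted_ranks[-1], n + 1)
--     else:
--         return None
-- ===== SOURCE B (Python) =====
-- def _fit_phoenix_in_straight(ranks: list[int]) -> tuple[int, int] | None:
--     """Find best placement for Phoenix in a straight. Returns (high_rank, length) or None."""
--     s = set(ranks)
--     if not ranks or len(s) != len(ranks):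
--         return None
--     lo, hi, n = min(ranks), max(ranks), len(ranks)
--     missing = (hi - lo + 1) - n  # integers absent from [lo, hi]
--     if missing == 0:
--         high = hi + 1
--         if high > 14:
--             return (hi, n + 1)
--         return (high, n + 1)
--     if missing == 1:
--         return (hi, n + 1)
--     return None
-- ===== Notes on version B (the rewrite author's own statement) =====
-- stated objective: faster
-- what changed: Replaces sort plus the consecutive-difference gap loop by a closed arithmetic test: with distinct ranks, missing = (max - min + 1) - len counts the absent integers of [min,max], and missing 0/1/other decides the three outcomes directly from min, max and length.
import Mathlib
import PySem

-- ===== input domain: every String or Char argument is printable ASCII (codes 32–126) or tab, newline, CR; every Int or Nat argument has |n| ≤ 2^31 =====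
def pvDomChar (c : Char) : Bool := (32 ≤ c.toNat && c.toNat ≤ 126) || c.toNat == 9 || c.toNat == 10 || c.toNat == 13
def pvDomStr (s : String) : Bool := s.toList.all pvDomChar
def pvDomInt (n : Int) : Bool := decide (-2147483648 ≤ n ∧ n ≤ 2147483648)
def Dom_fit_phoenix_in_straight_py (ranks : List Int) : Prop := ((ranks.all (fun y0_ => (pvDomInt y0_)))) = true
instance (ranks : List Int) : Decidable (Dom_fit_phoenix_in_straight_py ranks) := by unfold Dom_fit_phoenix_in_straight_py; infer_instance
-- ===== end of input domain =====

-- B replaces A's sort + adjacent-difference gap loop by a closed arithmetic test on min, max and length.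

-- ===== PORT A =====
-- the 'for i in range(1, n)' loop of A: walks adjacent pairs, collects gap indices, early-returns None
def pvGapsLoop (prev : Int) (rest : List Int) (i : Int) (gaps : List Int) : Option (List Int) :=
  match rest with
  | [] => some gaps
  | y :: t =>
    let diff := y - prev
    if diff = 1 then pvGapsLoop y t (i + 1) gaps
    else if diff = 2 then pvGapsLoop y t (i + 1) (gaps ++ [i])
    else none

def fit_phoenix_in_straight_py (ranks : List Int) : Option (Int × Int) :=
  if ranks = [] then none
  else
    let sorted_ranks := PySem.List.sorted ranks (fun x => x) false
    let n : Int := sorted_ranks.length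
    if (PySem.Set.ofList sorted_ranks).length ≠ sorted_ranks.length then none
    else
      match sorted_ranks with
      | [] => none
      | y0 :: t =>  -- sorted_ranks[-1] = t.getLastD y0 (list known nonempty here)
        match pvGapsLoop y0 t 1 [] with
        | none => none
        | some gaps =>
          if gaps.length = 0 then
            let high := t.getLastD y0 + 1
            if high > 14 then some (t.getLastD y0, n + 1) else some (high, n + 1)
          else if gaps.length = 1 then some (t.getLastD y0, n + 1)
          else none

-- ===== PORT B =====
def fit_phoenix_in_straight_py_alt (ranks : List Int) : Option (Int × Int) :=
  let s := PySem.Set.ofList ranks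
  if ranks = [] ∨ s.length ≠ ranks.length then none
  else
    let lo := (PySem.List.min? ranks (fun x => x)).getD 0
    let hi := (PySem.List.max? ranks (fun x => x)).getD 0
    let n : Int := ranks.length
    let missing := (hi - lo + 1) - n
    if missing = 0 then
      let high := hi + 1
      if high > 14 then some (hi, n + 1) else some (high, n + 1)
    else if missing = 1 then some (hi, n + 1)
    else none

-- ===== PRECONDITION & SPEC =====
def Spec_fit_phoenix_in_straight_py (ranks : List Int) (out : Option (Int × Int)) : Prop := out = fit_phoenix_in_straight_py_alt ranks
instance (ranks : List Int) (out : Option (Int × Int)) : Decidable (Spec_fit_phoenix_in_straight_py ranks out) := by unfold Spec_fit_phoenix_in_straight_py; infer_instance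

-- ===== CLAIM (what is proved, stated in full; the proofs are below) =====
def Claim_equal_fit_phoenix_in_straight_py : Prop := ∀ (ranks : List Int), Dom_fit_phoenix_in_straight_py ranks → Spec_fit_phoenix_in_straight_py ranks (fit_phoenix_in_straight_py ranks)

-- ===== LEMMAS AND PROOFS =====

-- PySem.Set.ofList xs is a sublist of xs
theorem pv_foldl_add_sublist {α : Type} [BEq α] (ys : List α) (s : List α) :
    List.Sublist (List.foldl PySem.Set.add s ys) (s ++ ys) := by
  induction ys generalizing s with
  | nil => simp
  | cons y t ih =>
    simp only [List.foldl_cons]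
    by_cases h : List.contains s y
    · have : PySem.Set.add s y = s := by simp [PySem.Set.add, PySem.Set.contains_eq_listContains, h]
      rw [this]
      exact (ih s).trans (List.Sublist.append_left (List.sublist_cons_self y t) s)
    · have : PySem.Set.add s y = s ++ [y] := by simp [PySem.Set.add, PySem.Set.contains_eq_listContains, h]
      rw [this]
      have := ih (s ++ [y])
      simpa using this
theorem pv_ofList_sublist (xs : List Int) : List.Sublist (PySem.Set.ofList xs) xs := by
  have := pv_foldl_add_sublist xs ([] : List Int)
  simpa [PySem.Set.ofList_eq_foldl] using this

theorem pv_ofList_len_iff (xs : List Int) :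
    (PySem.Set.ofList xs).length = xs.length ↔ xs.Nodup := by
  constructor
  · intro h
    have he := List.Sublist.eq_of_length (pv_ofList_sublist xs) h
    have := PySem.Set.nodup_ofList (xs := xs)
    rwa [he] at this
  · intro h
    rw [PySem.Set.ofList_eq_self_of_nodup _ h]

-- last element dominates a strictly increasing chain
theorem pv_last_ge (t : List Int) : ∀ (y0 : Int), List.IsChain (· < ·) (y0 :: t) →
    y0 ≤ t.getLastD y0 ∧ (t.getLastD y0) - y0 ≥ (t.length : Int) := by
  induction t with
  | nil => intro y0 _; simp
  | cons y t ih =>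
    intro y0 hc
    rcases hc with _ | _ | ⟨hlt, hc⟩
    have := ih y hc
    have hL : (y :: t).getLastD y0 = t.getLastD y := by
      cases t <;> simp [List.getLastD]
    rw [hL]
    constructor
    · omega
    · simp only [List.length_cons]
      push_cast
      omega

theorem pv_mem_le_last (t : List Int) : ∀ (y0 : Int), List.IsChain (· < ·) (y0 :: t) →
    ∀ y ∈ y0 :: t, y ≤ t.getLastD y0 := by
  induction t with
  | nil => intro y0 _ y hy; simp at hy; simp [hy]
  | cons z t ih =>
    intro y0 hc y hy
    rcases hc with _ | _ | ⟨hlt, hc⟩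
    have hL : (z :: t).getLastD y0 = t.getLastD z := by
      cases t <;> simp [List.getLastD]
    rw [hL]
    rcases List.mem_cons.mp hy with rfl | hy
    · have := ih z hc z (by simp)
      omega
    · exact ih z hc y hy

theorem pv_first_le_mem (t : List Int) : ∀ (y0 : Int), List.IsChain (· < ·) (y0 :: t) →
    ∀ y ∈ y0 :: t, y0 ≤ y := by
  induction t with
  | nil => intro y0 _ y hy; simp at hy; simp [hy]
  | cons z t ih =>
    intro y0 hc y hy
    rcases hc with _ | _ | ⟨hlt, hc⟩
    rcases List.mem_cons.mp hy with rfl | hy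
    · exact le_refl _
    · have := ih z hc y hy
      omega

-- characterisation of A's gap loop on a strictly increasing chain
theorem pv_gaps_spec (t : List Int) : ∀ (y0 i : Int) (gaps : List Int),
    List.IsChain (· < ·) (y0 :: t) →
    (match pvGapsLoop y0 t i gaps with
     | some g => t.getLastD y0 - y0 = (t.length : Int) + ((g.length : Int) - (gaps.length : Int))
                  ∧ gaps.length ≤ g.length
     | none => t.getLastD y0 - y0 ≥ (t.length : Int) + 2) := by
  induction t with
  | nil => intro y0 i gaps _; simp [pvGapsLoop]
  | cons y t ih =>
    intro y0 i gaps hc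
    rcases hc with _ | _ | ⟨hlt, hc⟩
    have hL : (y :: t).getLastD y0 = t.getLastD y := by
      cases t <;> simp [List.getLastD]
    simp only [pvGapsLoop, hL, List.length_cons]
    by_cases h1 : y - y0 = 1
    · simp only [h1]
      have := ih y (i + 1) gaps hc
      revert this
      cases pvGapsLoop y t (i + 1) gaps with
      | none => intro h; simp only at h ⊢; push_cast; omega
      | some g => intro h; simp only at h ⊢; push_cast; omega
    · rw [if_neg h1]
      by_cases h2 : y - y0 = 2
      · rw [if_pos h2]
        have := ih y (i + 1) (gaps ++ [i]) hc
        revert this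
        cases pvGapsLoop y t (i + 1) (gaps ++ [i]) with
        | none => intro h; simp only at h ⊢; push_cast; omega
        | some g => intro h; simp only [List.length_append, List.length_cons,
            List.length_nil] at h ⊢; push_cast at h ⊢; omega
      · rw [if_neg h2]
        have h3 : y - y0 ≥ 3 := by omega
        have := (pv_last_ge t y hc).2
        simp only
        push_cast
        omega

theorem fit_phoenix_spec_aux (ranks : List Int) :
    fit_phoenix_in_straight_py ranks = fit_phoenix_in_straight_py_alt ranks := by
  by_cases hnil : ranks = []
  · subst hnil; decide
  · by_cases hnd : ranks.Nodup
    · -- distinct case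
      set ys := PySem.List.sorted ranks (fun x => x) false with hys
      have hperm : ys.Perm ranks := PySem.List.sorted_perm ..
      have hysnd : ys.Nodup := hperm.nodup_iff.mpr hnd
      have hple : ys.Pairwise (fun a b => (fun x => x) a ≤ (fun x => x) b) :=
        PySem.List.sorted_pairwise ..
      have hplt : ys.Pairwise (· < ·) := by
        have := List.Pairwise.and hple hysnd
        exact this.imp (fun h => lt_of_le_of_ne h.1 h.2)
      have hysne : ys ≠ [] := by
        intro h
        rw [h] at hperm
        exact hnil hperm.symm.eq_nil
      obtain ⟨y0, t, hyt⟩ := List.exists_cons_of_ne_nil hysne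
      have hchain : List.IsChain (· < ·) (y0 :: t) := by
        rw [List.isChain_iff_pairwise]
        rw [hyt] at hplt
        exact hplt
      have hsetA : (PySem.Set.ofList ys).length = ys.length :=
        (pv_ofList_len_iff ys).mpr hysnd
      have hsetB : (PySem.Set.ofList ranks).length = ranks.length :=
        (pv_ofList_len_iff ranks).mpr hnd
      have hlen : ys.length = ranks.length := hperm.length_eq
      -- min and max of ranks are the head and last of the sorted list
      have hmin : (PySem.List.min? ranks (fun x => x)).getD 0 = y0 := by
        cases hm : PySem.List.min? ranks (fun x => x) with
        | none => exact absurd ((PySem.List.min?_eq_none_iff _ _).mp hm) hnil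
        | some m =>
          have hmem : m ∈ ranks := PySem.List.min?_mem hm
          have hmys : m ∈ ys := hperm.mem_iff.mpr hmem
          have h1 : y0 ≤ m := pv_first_le_mem t y0 hchain m (hyt ▸ hmys)
          have hy0 : y0 ∈ ranks := hperm.mem_iff.mp (hyt ▸ List.mem_cons_self ..)
          have h2 : m ≤ y0 := PySem.List.min?_isMin hm y0 hy0
          simp only [Option.getD_some]
          omega
      have hmax : (PySem.List.max? ranks (fun x => x)).getD 0 = t.getLastD y0 := by
        cases hm : PySem.List.max? ranks (fun x => x) with
        | none => exact absurd ((PySem.List.max?_eq_none_iff _ _).mp hm) hnil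
        | some m =>
          have hmem : m ∈ ranks := PySem.List.max?_mem hm
          have hmys : m ∈ ys := hperm.mem_iff.mpr hmem
          have h1 : m ≤ t.getLastD y0 := pv_mem_le_last t y0 hchain m (hyt ▸ hmys)
          have hlm : t.getLastD y0 ∈ ys := by
            rw [hyt]
            rcases t.eq_nil_or_concat with rfl | ⟨l, a, rfl⟩
            · simp
            · simp
          have h2 : t.getLastD y0 ≤ m :=
            PySem.List.max?_isMax hm _ (hperm.mem_iff.mp hlm)
          simp only [Option.getD_some]
          omega
      -- unfold both ports and compare branch by branch
      rw [fit_phoenix_in_straight_py, fit_phoenix_in_straight_py_alt]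
      simp only [hnil, if_false, ← hys, hsetB, hmin, hmax]
      rw [if_neg (by simp [hsetA])]
      rw [if_neg (by simp)]
      rw [hyt]
      have hlen' : (t.length : Int) + 1 = (ranks.length : Int) := by
        rw [← hlen, hyt]; push_cast [List.length_cons]; ring
      have hg := pv_gaps_spec t y0 1 [] hchain
      cases hgl : pvGapsLoop y0 t 1 [] with
      | none =>
        rw [hgl] at hg
        simp only at hg
        simp only [hgl]
        rw [if_neg (by omega), if_neg (by omega)]
      | some g =>
        rw [hgl] at hg
        simp only [List.length_nil, Nat.cast_zero] at hg
        obtain ⟨hg1, -⟩ := hg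
        simp only [hgl]
        have hn : (((y0 :: t).length : Nat) : Int) = (ranks.length : Int) := by
          simp only [List.length_cons]; push_cast; omega
        rw [hn]
        split_ifs <;> first | rfl | (exfalso; omega)
    · -- duplicate case: both return none
      have hA : (PySem.Set.ofList (PySem.List.sorted ranks (fun x => x) false)).length
          ≠ ranks.length := by
        intro h
        rw [← (PySem.List.sorted_perm ranks (fun x => x) false).length_eq] at h
        exact hnd ((PySem.List.sorted_perm ..).nodup_iff.mp ((pv_ofList_len_iff _).mp h))
      have hB : (PySem.Set.ofList ranks).length ≠ ranks.length := by
        intro h; exact hnd ((pv_ofList_len_iff ranks).mp h)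
      simp [fit_phoenix_in_straight_py, fit_phoenix_in_straight_py_alt, hnil, hA, hB]

-- ===== VERDICT (by name: the statement is the Claim_ definition above) =====
theorem fit_phoenix_in_straight_py_spec : Claim_equal_fit_phoenix_in_straight_py := by
  intro ranks _
  exact fit_phoenix_spec_aux ranks
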